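-- pv_equiv track=rewrite | github.com/vpovarna/AdventOfCode | python/2025/day06/day06.py | cephalopod_math
-- ===== SOURCE A (Python) =====
-- def cephalopod_math(column:list[int], step:int, operation:str) -> int:
--     total = 0
--
--     if operation == "*":
--         total = 1
--
--     for i in range(step -1, -1, -1):
--         concat_nr = ""
--         for nr in column:
--             if nr[i] == ' ':
--                 continue
--             concat_nr += nr[i]
--         if operation == "+":
--             total += int(concat_nr)
--         else:
--             total *= int(concat_nr)
--     return total
-- ===== SOURCE B (Python) =====
-- def cephalopod_math(column, step, operation):
--     # Transpose in ONE row-major pass: buckets[i] accumulates column i's digits.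
--     buckets = [''] * step
--     for nr in column:
--         for i in range(step):
--             ch = nr[i]
--             if ch != ' ':
--                 buckets[i] += ch
--     if operation == "+":
--         total = 0
--         for s in buckets:
--             total += int(s)
--     else:
--         total = 1 if operation == "*" else 0
--         for s in buckets:
--             total *= int(s)
--     return total
-- ===== Notes on version B (the rewrite author's own statement) =====
-- stated objective: alternative
-- what changed: B traverses the grid row-major in a single pass, building all per-column accumulators (a bucket array) simultaneously, and only afterwards parses and aggregates them; A instead makes one column-major nested scan per column index (descending) interleaving string building with the running total.
import Mathlib
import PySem

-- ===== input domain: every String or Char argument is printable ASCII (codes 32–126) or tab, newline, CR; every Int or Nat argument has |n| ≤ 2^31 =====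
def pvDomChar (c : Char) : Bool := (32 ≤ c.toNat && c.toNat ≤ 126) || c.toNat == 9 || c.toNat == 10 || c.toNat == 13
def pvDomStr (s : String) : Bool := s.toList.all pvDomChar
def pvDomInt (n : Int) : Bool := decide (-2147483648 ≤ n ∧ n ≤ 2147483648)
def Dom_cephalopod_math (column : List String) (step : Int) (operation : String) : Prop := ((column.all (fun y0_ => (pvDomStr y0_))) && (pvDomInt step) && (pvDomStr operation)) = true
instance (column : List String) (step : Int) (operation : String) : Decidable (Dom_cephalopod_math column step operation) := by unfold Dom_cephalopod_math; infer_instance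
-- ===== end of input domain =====

-- B transposes the grid in one row-major pass into per-column buckets, then aggregates; objective: alternative traversal.

-- ===== PORT A =====
-- literal port of A: one descending loop over i = step-1 .. 0, building the column
-- string and updating the running total in the same iteration.
def cephalopod_math (column : List String) (step : Int) (operation : String) : Int :=
  let total : Int := if operation = "*" then 1 else 0
  (PySem.List.pyRange (step - 1) (-1) (-1)).foldl
    (fun total i =>
      let concat : List Char := column.foldl
        (fun acc nr =>
          match PySem.Str.pyGet? nr i with
          | none => acc                                -- IndexError in Python; excluded by Pre_
          | some c => if c = ' ' then acc else acc ++ [c])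
        []
      let v : Int := (PySem.Int.ofChars? concat).getD 0   -- ValueError (none) excluded by Pre_
      if operation = "+" then total + v else total * v)
    total

-- ===== PORT B =====
-- one row's update of the bucket array: buckets[i] += nr[i] (spaces skipped);
-- nr[i] out of range (IndexError in Python) is excluded by Pre_
def pvRowUpdate (step : Nat) (bs : List (List Char)) (nr : String) : List (List Char) :=
  (List.range step).map (fun i =>
    let b := bs.getD i []
    match PySem.Str.pyGet? nr (i : Int) with
    | none => b
    | some c => if c = ' ' then b else b ++ [c])

def cephalopod_math_alt (column : List String) (step : Int) (operation : String) : Int :=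
  let n := step.toNat
  let buckets := column.foldl (pvRowUpdate n) ((List.range n).map (fun _ => []))
  let nums : List Int := buckets.map (fun b => (PySem.Int.ofChars? b).getD 0)
  if operation = "+" then nums.foldl (· + ·) 0
  else nums.foldl (· * ·) (if operation = "*" then 1 else 0)

-- ===== PRECONDITION & SPEC =====
-- the characters of column i (spaces dropped)
def pvColChars (column : List String) (i : Nat) : List Char :=
  column.flatMap (fun nr => ((PySem.Str.pyGet? nr (i : Int)).toList).filter (fun c => c ≠ ' '))

-- Pre_ excludes exactly the inputs where Python A raises: an IndexError (some used
-- column index i < step out of range for some row) or a ValueError (a column string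
-- that int() cannot parse).
def Pre_cephalopod_math (column : List String) (step : Int) (operation : String) : Prop :=
  (column = [] → step ≤ 0) ∧ (∀ nr ∈ column, step.toNat ≤ nr.toList.length) ∧
  ∀ i ∈ List.range step.toNat, (PySem.Int.ofChars? (pvColChars column i)).isSome
instance (column : List String) (step : Int) (operation : String) : Decidable (Pre_cephalopod_math column step operation) := by unfold Pre_cephalopod_math; infer_instance

def pvWitness_cephalopod_math : List String × Int × String := (["12", "34"], 2, "+")

def Spec_cephalopod_math (column : List String) (step : Int) (operation : String) (out : Int) : Prop := out = cephalopod_math_alt column step operation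
instance (column : List String) (step : Int) (operation : String) (out : Int) : Decidable (Spec_cephalopod_math column step operation out) := by unfold Spec_cephalopod_math; infer_instance

-- ===== CLAIM (what is proved, stated in full; the proofs are below) =====
def Claim_equal_cephalopod_math : Prop := ∀ (column : List String) (step : Int) (operation : String), Dom_cephalopod_math column step operation → Pre_cephalopod_math column step operation → Spec_cephalopod_math column step operation (cephalopod_math column step operation)

-- ===== LEMMAS AND PROOFS =====

-- A's per-index value, with the Python Int index
def pvColInt (column : List String) (i : Int) : Int :=
  (PySem.Int.ofChars? (column.flatMap
    (fun nr => (PySem.Str.pyGet? nr i).toList.filter (fun c => c ≠ ' ')))).getD 0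

theorem pv_inner_eq (column : List String) (i : Int) (acc : List Char) :
    column.foldl
      (fun acc nr =>
        match PySem.Str.pyGet? nr i with
        | none => acc
        | some c => if c = ' ' then acc else acc ++ [c]) acc
      = acc ++ column.flatMap (fun nr => (PySem.Str.pyGet? nr i).toList.filter (fun c => c ≠ ' ')) := by
  induction column generalizing acc with
  | nil => simp
  | cons nr rest ih =>
      simp only [List.foldl_cons, List.flatMap_cons, ih]
      cases h : PySem.Str.pyGet? nr i with
      | none => simp
      | some c =>
          by_cases hc : c = ' ' <;> simp [hc]

-- invariant of B's row-major pass: after processing the rows, bucket i holds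
-- g i ++ (the non-space characters of column i of the processed rows)
theorem pv_buckets_eq (n : Nat) (column : List String) (g : Nat → List Char) :
    column.foldl (pvRowUpdate n) ((List.range n).map g)
      = (List.range n).map (fun i => g i ++ pvColChars column i) := by
  induction column generalizing g with
  | nil => simp [pvColChars]
  | cons nr rest ih =>
      simp only [List.foldl_cons]
      have hstep : pvRowUpdate n ((List.range n).map g) nr
          = (List.range n).map (fun i =>
              g i ++ (PySem.Str.pyGet? nr (i : Int)).toList.filter (fun c => c ≠ ' ')) := by
        unfold pvRowUpdate
        refine List.map_congr_left ?_
        intro i hi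
        have hlt : i < n := List.mem_range.mp hi
        cases h : PySem.Str.pyGet? nr (i : Int) with
        | none => simp [h, List.getElem?_range, hlt]
        | some c => by_cases hc : c = ' ' <;> simp [h, hc, List.getElem?_range, hlt]
      rw [hstep, ih]
      refine List.map_congr_left ?_
      intro i _
      simp [pvColChars, List.flatMap_cons, List.append_assoc]

theorem pv_foldl_add (l : List Int) (init : Int) :
    l.foldl (· + ·) init = init + l.sum := by
  induction l generalizing init with
  | nil => simp
  | cons x xs ih => simp [List.foldl_cons, ih]; ring

theorem pv_foldl_mul (l : List Int) (init : Int) :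
    l.foldl (· * ·) init = init * l.prod := by
  induction l generalizing init with
  | nil => simp
  | cons x xs ih => simp [List.foldl_cons, ih]; ring

theorem pv_foldl_add_f (l : List Int) (f : Int → Int) (init : Int) :
    l.foldl (fun t i => t + f i) init = init + (l.map f).sum := by
  induction l generalizing init with
  | nil => simp
  | cons x xs ih => simp [List.foldl_cons, ih]; ring

theorem pv_foldl_mul_f (l : List Int) (f : Int → Int) (init : Int) :
    l.foldl (fun t i => t * f i) init = init * (l.map f).prod := by
  induction l generalizing init with
  | nil => simp
  | cons x xs ih => simp [List.foldl_cons, ih]; ring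

-- ===== VERDICT (by name: the statement is the Claim_ definition above) =====
theorem cephalopod_math_spec : Claim_equal_cephalopod_math := by
  intro column step operation _ _
  unfold Spec_cephalopod_math cephalopod_math cephalopod_math_alt
  have hrange : PySem.List.pyRange (step - 1) (-1) (-1)
      = (PySem.List.pyRange 0 step 1).reverse := by
    rw [PySem.List.pyRange_neg_one_eq_reverse]
    norm_num
  have hbody : ∀ total i,
      (fun total i =>
        let concat : List Char := column.foldl
          (fun acc nr =>
            match PySem.Str.pyGet? nr i with
            | none => acc
            | some c => if c = ' ' then acc else acc ++ [c]) []
        let v : Int := (PySem.Int.ofChars? concat).getD 0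
        if operation = "+" then total + v else total * v) total i
      = if operation = "+" then total + pvColInt column i else total * pvColInt column i := by
    intro total i
    simp only [pv_inner_eq, List.nil_append, pvColInt]
  simp only [hrange, hbody]
  have hbuck : column.foldl (pvRowUpdate step.toNat)
        ((List.range step.toNat).map (fun _ => ([] : List Char)))
      = (List.range step.toNat).map (pvColChars column) := by
    rw [pv_buckets_eq]
    simp
  rw [hbuck]
  have hmapeq : ((PySem.List.pyRange 0 step 1).map (pvColInt column))
      = ((List.range step.toNat).map (pvColChars column)).map
          (fun b => (PySem.Int.ofChars? b).getD 0) := by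
    rw [PySem.List.pyRange_one]
    simp only [List.map_map, Int.sub_zero]
    refine List.map_congr_left ?_
    intro k _
    simp [Function.comp, pvColInt, pvColChars]
  by_cases hop : operation = "+"
  · simp only [hop, if_true]
    rw [pv_foldl_add_f, pv_foldl_add, List.map_reverse, List.sum_reverse, hmapeq]
    norm_num
    decide
  · simp only [hop, if_false]
    rw [pv_foldl_mul_f, pv_foldl_mul, List.map_reverse, List.prod_reverse, hmapeq]
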